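-- pv_equiv track=rewrite | github.com/Jeremyy55/AO_TP1 | hypervolume/jer.py | domine_min
-- ===== SOURCE A (Python) =====
-- def domine_min(solution_1, solution_2):
--     bool_domine = True
--     all_equal = True
--     for i in range(len(solution_2)):
--         if solution_1[i] > solution_2[i]:
--             bool_domine = False
--             break
--         elif solution_1[i] != solution_2[i]:
--             all_equal = False
--     if all_equal:
--         return False
--     else:
--         return bool_domine
-- ===== SOURCE B (Python) =====
-- def domine_min(solution_1, solution_2):
--     # simpler: two short-circuiting reductions instead of one stateful loop with flags and break
--     n = len(solution_2)
--     dominates = all(solution_1[i] <= solution_2[i] for i in range(n))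
--     return dominates and any(solution_1[i] < solution_2[i] for i in range(n))
-- ===== Notes on version B (the rewrite author's own statement) =====
-- stated objective: simpler
-- what changed: Replaced A's single stateful loop with two boolean flags and a break by two independent short-circuiting reductions (all of <= then any of <) over the same index range, returning their conjunction.
import Mathlib
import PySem

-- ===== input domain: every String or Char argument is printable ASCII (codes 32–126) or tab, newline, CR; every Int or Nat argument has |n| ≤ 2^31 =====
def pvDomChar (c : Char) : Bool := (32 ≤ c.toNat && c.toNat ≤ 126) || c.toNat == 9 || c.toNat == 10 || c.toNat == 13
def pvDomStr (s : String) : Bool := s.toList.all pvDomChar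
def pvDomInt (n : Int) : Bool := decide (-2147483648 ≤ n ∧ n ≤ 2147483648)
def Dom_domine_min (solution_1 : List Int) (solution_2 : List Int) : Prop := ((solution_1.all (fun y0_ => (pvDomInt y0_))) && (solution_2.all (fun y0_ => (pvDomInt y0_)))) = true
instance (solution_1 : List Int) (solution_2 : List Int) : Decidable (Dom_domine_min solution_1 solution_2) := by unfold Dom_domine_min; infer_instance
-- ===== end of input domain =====

-- B replaces A's single stateful flag-loop with a break by two independent short-circuiting
-- boolean reductions (all <= , then any <) over the same index range: simpler decomposition.


-- ===== PORT A =====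
-- the for-loop: state (bool_domine, all_equal); `break` returns early; none = IndexError
def pvLoopA (s1 s2 : List Int) : List Nat → Bool → Bool → Option (Bool × Bool)
  | [], bd, ae => some (bd, ae)
  | i :: rest, bd, ae =>
    match PySem.List.pyGet? s1 (i : Int), PySem.List.pyGet? s2 (i : Int) with
    | some a, some b =>
      if a > b then some (false, ae)            -- bool_domine = False; break
      else if a ≠ b then pvLoopA s1 s2 rest bd false
      else pvLoopA s1 s2 rest bd ae
    | _, _ => none

def domine_min (solution_1 : List Int) (solution_2 : List Int) : Bool :=
  match pvLoopA solution_1 solution_2 (List.range solution_2.length) true true with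
  | some (bd, ae) => if ae then false else bd
  | none => false                               -- IndexError in Python; excluded by Pre_

-- ===== PORT B =====
-- all(solution_1[i] <= solution_2[i] for i in range(n)), short-circuiting; none = IndexError
def pvAllLe (s1 s2 : List Int) : List Nat → Option Bool
  | [] => some true
  | i :: rest =>
    match PySem.List.pyGet? s1 (i : Int), PySem.List.pyGet? s2 (i : Int) with
    | some a, some b => if a ≤ b then pvAllLe s1 s2 rest else some false
    | _, _ => none

-- any(solution_1[i] < solution_2[i] for i in range(n)), short-circuiting; none = IndexError
def pvAnyLt (s1 s2 : List Int) : List Nat → Option Bool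
  | [] => some false
  | i :: rest =>
    match PySem.List.pyGet? s1 (i : Int), PySem.List.pyGet? s2 (i : Int) with
    | some a, some b => if a < b then some true else pvAnyLt s1 s2 rest
    | _, _ => none

def domine_min_alt (solution_1 : List Int) (solution_2 : List Int) : Bool :=
  match pvAllLe solution_1 solution_2 (List.range solution_2.length) with
  | some true =>
      match pvAnyLt solution_1 solution_2 (List.range solution_2.length) with
      | some b => b
      | none => false                           -- unreachable when the all-pass succeeded
  | _ => false                                  -- `and` short-circuits: the any-pass is not run

-- ===== PRECONDITION & SPEC =====
-- Pre_ excludes exactly the inputs where Python A raises IndexError: those where solution_1 is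
-- shorter than solution_2 and the loop reaches index len(solution_1) without having broken
-- (no earlier strictly-worse coordinate). B raises IndexError on exactly the same inputs.
def Pre_domine_min (solution_1 : List Int) (solution_2 : List Int) : Prop :=
  solution_2.length ≤ solution_1.length ∨
    ∃ j < solution_1.length, solution_2.getD j 0 < solution_1.getD j 0
instance (solution_1 : List Int) (solution_2 : List Int) : Decidable (Pre_domine_min solution_1 solution_2) := by unfold Pre_domine_min; infer_instance

def pvWitness_domine_min : List Int × List Int := ([1, 2], [2, 2])

def Spec_domine_min (solution_1 : List Int) (solution_2 : List Int) (out : Bool) : Prop := out = domine_min_alt solution_1 solution_2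
instance (solution_1 : List Int) (solution_2 : List Int) (out : Bool) : Decidable (Spec_domine_min solution_1 solution_2 out) := by unfold Spec_domine_min; infer_instance

-- ===== CLAIM (what is proved, stated in full; the proofs are below) =====
def Claim_equal_domine_min : Prop := ∀ (solution_1 : List Int) (solution_2 : List Int), Dom_domine_min solution_1 solution_2 → Pre_domine_min solution_1 solution_2 → Spec_domine_min solution_1 solution_2 (domine_min solution_1 solution_2)

-- ===== LEMMAS AND PROOFS =====

-- if the all-pass completes without IndexError, so does the any-pass (same indices are read)
lemma pvAnyLt_isSome (s1 s2 : List Int) :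
    ∀ L : List Nat, pvAllLe s1 s2 L = some true → (pvAnyLt s1 s2 L).isSome := by
  intro L
  induction L with
  | nil => intro _; simp [pvAnyLt]
  | cons i rest ih =>
    intro h
    simp only [pvAllLe, pvAnyLt] at *
    cases h1 : PySem.List.pyGet? s1 (i : Int) with
    | none => simp [h1] at h
    | some a =>
      cases h2 : PySem.List.pyGet? s2 (i : Int) with
      | none => simp [h1, h2] at h
      | some b =>
        simp only [h1, h2] at h ⊢
        by_cases hle : a ≤ b
        · simp only [if_pos hle] at h
          by_cases hlt : a < b
          · simp [if_pos hlt]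
          · simpa [if_neg hlt] using ih h
        · simp [if_neg hle] at h

-- core invariant: A's loop result (postprocessed by the final if) equals B's two reductions,
-- with the accumulated all_equal flag ae folded in as (!ae || ·)
lemma pvKey (s1 s2 : List Int) :
    ∀ (L : List Nat) (ae : Bool),
      (match pvLoopA s1 s2 L true ae with
       | some (bd, ae') => if ae' then false else bd
       | none => false)
      = (match pvAllLe s1 s2 L with
         | some true =>
             (match pvAnyLt s1 s2 L with
              | some b => !ae || b
              | none => false)
         | _ => false) := by
  intro L
  induction L with
  | nil => intro ae; cases ae <;> simp [pvLoopA, pvAllLe, pvAnyLt]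
  | cons i rest ih =>
    intro ae
    simp only [pvLoopA, pvAllLe, pvAnyLt]
    cases h1 : PySem.List.pyGet? s1 (i : Int) with
    | none => simp
    | some a =>
      cases h2 : PySem.List.pyGet? s2 (i : Int) with
      | none => simp
      | some b =>
        simp only []
        by_cases hgt : a > b
        · have hnle : ¬ a ≤ b := not_le.mpr hgt
          simp [if_pos hgt, if_neg hnle]
        · have hle : a ≤ b := not_lt.mp hgt
          simp only [if_neg hgt, if_pos hle]
          by_cases hne : a ≠ b
          · have hlt : a < b := lt_of_le_of_ne hle hne
            rw [if_pos hne, if_pos hlt, ih false]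
            cases hall : pvAllLe s1 s2 rest with
            | none => simp
            | some t =>
              cases t with
              | false => simp
              | true =>
                have hsome := pvAnyLt_isSome s1 s2 rest hall
                cases hany : pvAnyLt s1 s2 rest with
                | none => rw [hany] at hsome; simp at hsome
                | some b' => simp
          · have hnlt : ¬ a < b := by
              push_neg at hne; omega
            rw [if_neg hne, if_neg hnlt, ih ae]

theorem pv_main (s1 s2 : List Int) : domine_min s1 s2 = domine_min_alt s1 s2 := by
  unfold domine_min domine_min_alt
  have h := pvKey s1 s2 (List.range s2.length) true
  simp only [Bool.not_true, Bool.false_or] at h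
  exact h

-- ===== VERDICT (by name: the statement is the Claim_ definition above) =====
theorem domine_min_spec : Claim_equal_domine_min := by
  intro s1 s2 _ _
  unfold Spec_domine_min
  exact pv_main s1 s2
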